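-- pv_equiv track=rewrite | github.com/jalddak/ps_training | python/programmers/level 2/괄호 회전하기.py | solution
-- ===== SOURCE A (Python) =====
-- from collections import deque
--
-- def solution(s):
--     answer = 0
--
--     s = deque(s)
--
--     for _ in range(len(s)):
--         s.append(s.popleft())
--         stack = []
--         for letter in s:
--             if letter in ['[', '{', '(']:
--                 stack.append(letter)
--             elif len(stack) > 0:
--                 if letter == ']' and stack[-1] == '[':
--                     stack.pop()
--                 elif letter == '}' and stack[-1] == '{':
--                     stack.pop()
--                 elif letter == ')' and stack[-1] == '(':
--                     stack.pop()
--                 else: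
--                     answer -= 1
--                     stack = []
--                     break
--             else:
--                 answer -= 1
--                 stack = []
--                 break
--
--         if len(stack) != 0:
--             answer -= 1
--
--         answer += 1
--
--
--     return answer
-- ===== SOURCE B (Python) =====
-- def solution(s):
--     n = len(s)
--     answer = 0
--     for i in range(n):
--         t = s[i:] + s[:i]
--         while True:
--             u = t.replace('()', '').replace('[]', '').replace('{}', '')
--             if u == t:
--                 break
--             t = u
--         if t == '':
--             answer += 1
--     return answer
-- ===== Notes on version B (the rewrite author's own statement) =====
-- stated objective: alternative
-- what changed: The per-rotation stack scan is replaced by a pair-collapsing validity check: repeatedly delete adjacent matched bracket pairs (round, square, curly) until the rotation stops changing and accept it iff the result is empty, so validity is decided by shrinking the string instead of maintaining a stack.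
import Mathlib
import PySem

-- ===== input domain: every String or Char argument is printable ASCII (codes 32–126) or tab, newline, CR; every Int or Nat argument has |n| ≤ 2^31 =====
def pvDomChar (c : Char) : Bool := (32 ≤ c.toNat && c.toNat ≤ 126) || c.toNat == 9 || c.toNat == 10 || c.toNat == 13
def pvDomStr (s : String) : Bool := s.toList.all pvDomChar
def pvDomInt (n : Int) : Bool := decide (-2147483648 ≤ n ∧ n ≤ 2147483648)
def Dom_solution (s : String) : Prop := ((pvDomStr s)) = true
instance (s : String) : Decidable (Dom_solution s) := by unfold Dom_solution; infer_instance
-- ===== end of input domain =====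

-- B replaces A's per-rotation stack scan by a pair-collapsing check (repeatedly delete
-- adjacent matched bracket pairs until the rotation stops changing; valid iff empty):
-- an alternative algorithm, not a faster one.

-- ===== PORT A =====
-- inner `for letter in s` loop: returns (answer, stack); a `break` returns (answer - 1, [])
def solInner : List Char → List Char → Int → Int × List Char
  | [], stack, answer => (answer, stack)
  | c :: rest, stack, answer =>
    if c ∈ (['[', '{', '('] : List Char) then solInner rest (stack ++ [c]) answer
    else if 0 < stack.length then
      if c = ']' ∧ PySem.List.pyGet? stack (-1) = some '[' then
        solInner rest stack.dropLast answer
      else if c = '}' ∧ PySem.List.pyGet? stack (-1) = some '{' then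
        solInner rest stack.dropLast answer
      else if c = ')' ∧ PySem.List.pyGet? stack (-1) = some '(' then
        solInner rest stack.dropLast answer
      else (answer - 1, [])
    else (answer - 1, [])

-- one iteration of the outer loop: rotate the deque, scan, adjust answer
def solIter (st : Int × List Char) : Int × List Char :=
  let dq := st.2.tail ++ st.2.take 1          -- s.append(s.popleft())
  let p := solInner dq [] st.1
  let a := if p.2.length ≠ 0 then p.1 - 1 else p.1
  (a + 1, dq)

def solution (s : String) : Int :=
  ((PySem.List.pyRange 0 (PySem.List.len s.toList) 1).foldl (fun st _ => solIter st) (0, s.toList)).1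

-- ===== PORT B =====
def collapseStep (t : List Char) : List Char :=
  PySem.Chars.replace (PySem.Chars.replace (PySem.Chars.replace t ['(', ')'] []) ['[', ']'] []) ['{', '}'] []

-- termination facts for the `while True` collapse loop of Source B
theorem replGo_len_le (a b : Char) : ∀ (fuel : Nat) (l acc : List Char),
    (PySem.Chars.replace.go [a, b] [] fuel l acc).length ≤ acc.length + l.length := by
  intro fuel
  induction fuel with
  | zero => intro l acc; simp [PySem.Chars.replace.go]
  | succ fuel ih =>
    intro l acc
    match l with
    | [] => simp [PySem.Chars.replace.go]
    | c :: t =>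
      simp only [PySem.Chars.replace.go]
      split
      · exact le_trans (ih _ _) (by simp; omega)
      · exact le_trans (ih _ _) (by simp; omega)

theorem replGo_dich (a b : Char) : ∀ (fuel : Nat) (l acc : List Char),
    PySem.Chars.replace.go [a, b] [] fuel l acc = acc.reverse ++ l ∨
      (PySem.Chars.replace.go [a, b] [] fuel l acc).length < acc.length + l.length := by
  intro fuel
  induction fuel with
  | zero => intro l acc; left; simp [PySem.Chars.replace.go]
  | succ fuel ih =>
    intro l acc
    match l with
    | [] => left; simp [PySem.Chars.replace.go]
    | c :: t =>
      simp only [PySem.Chars.replace.go]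
      split
      · right
        have h1 := replGo_len_le a b fuel t.tail acc
        have h2 : t.tail.length ≤ t.length := by simp
        simp at h1 ⊢
        omega
      · rcases ih t (c :: acc) with h | h
        · left; rw [h]; simp
        · right; simp at h ⊢; omega

theorem repl_le (a b : Char) (l : List Char) :
    (PySem.Chars.replace l [a, b] []).length ≤ l.length := by
  have := replGo_len_le a b l.length l []
  simpa [PySem.Chars.replace] using this

theorem repl_dich (a b : Char) (l : List Char) :
    PySem.Chars.replace l [a, b] [] = l ∨ (PySem.Chars.replace l [a, b] []).length < l.length := by
  have := replGo_dich a b l.length l []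
  simpa [PySem.Chars.replace] using this

theorem collapseStep_lt (t : List Char) (h : collapseStep t ≠ t) : (collapseStep t).length < t.length := by
  rcases repl_dich '(' ')' t with h1 | h1
  · rcases repl_dich '[' ']' (PySem.Chars.replace t ['(', ')'] []) with h2 | h2
    · rcases repl_dich '{' '}' (PySem.Chars.replace (PySem.Chars.replace t ['(', ')'] []) ['[', ']'] []) with h3 | h3
      · exact absurd (by unfold collapseStep; rw [h3, h2, h1]) h
      · unfold collapseStep
        calc _ < _ := h3
          _ ≤ _ := le_trans (repl_le _ _ _) (repl_le _ _ _)
    · unfold collapseStep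
      calc _ ≤ _ := repl_le _ _ _
        _ < _ := h2
        _ ≤ _ := repl_le _ _ _
  · unfold collapseStep
    calc _ ≤ _ := le_trans (repl_le _ _ _) (repl_le _ _ _)
      _ < _ := h1

-- the `while True: … if u == t: break` loop of Source B
def collapse (t : List Char) : List Char :=
  let u := collapseStep t
  if h : u = t then t else collapse u
termination_by t.length
decreasing_by exact collapseStep_lt t h

def solution_alt (s : String) : Int :=
  let l := s.toList
  (PySem.List.pyRange 0 (PySem.List.len l) 1).foldl
    (fun answer i =>
      let t := PySem.List.slice l (some i) none ++ PySem.List.slice l none (some i)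
      if collapse t = [] then answer + 1 else answer) 0

-- ===== PRECONDITION & SPEC =====
def Spec_solution (s : String) (out : Int) : Prop := out = solution_alt s
instance (s : String) (out : Int) : Decidable (Spec_solution s out) := by unfold Spec_solution; infer_instance

-- ===== CLAIM (what is proved, stated in full; the proofs are below) =====
def Claim_equal_solution : Prop := ∀ (s : String), Dom_solution s → Spec_solution s (solution s)

-- ===== LEMMAS AND PROOFS =====

-- the stack automaton behind A's inner loop, as a fold step (none = the `break` state)
def pvStep (st : Option (List Char)) (c : Char) : Option (List Char) :=
  match st with
  | none => none
  | some stack =>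
    if c ∈ (['[', '{', '('] : List Char) then some (stack ++ [c])
    else if 0 < stack.length then
      if (c = ']' ∧ PySem.List.pyGet? stack (-1) = some '[') ∨
         (c = '}' ∧ PySem.List.pyGet? stack (-1) = some '{') ∨
         (c = ')' ∧ PySem.List.pyGet? stack (-1) = some '(') then some stack.dropLast
      else none
    else none

def pvScan (l : List Char) : Option (List Char) := l.foldl pvStep (some [])

theorem foldl_pvStep_none (l : List Char) : l.foldl pvStep none = none := by
  induction l with
  | nil => rfl
  | cons c t ih => simpa [pvStep] using ih

theorem solInner_eq (letters : List Char) : ∀ (stack : List Char) (ans : Int),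
    solInner letters stack ans =
      match letters.foldl pvStep (some stack) with
      | some st' => (ans, st')
      | none => (ans - 1, []) := by
  induction letters with
  | nil => intro stack ans; rfl
  | cons c rest ih =>
    intro stack ans
    by_cases h1 : c ∈ (['[', '{', '('] : List Char)
    · simp only [solInner, List.foldl_cons, pvStep, if_pos h1]
      exact ih (stack ++ [c]) ans
    · by_cases h2 : 0 < stack.length
      · by_cases h3 : (c = ']' ∧ PySem.List.pyGet? stack (-1) = some '[') ∨
            (c = '}' ∧ PySem.List.pyGet? stack (-1) = some '{') ∨
            (c = ')' ∧ PySem.List.pyGet? stack (-1) = some '(')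
        · have hstep : pvStep (some stack) c = some stack.dropLast := by
            simp only [pvStep, if_neg h1, if_pos h2, if_pos h3]
          have : solInner (c :: rest) stack ans = solInner rest stack.dropLast ans := by
            rcases h3 with h | h | h
            · simp only [solInner, if_neg h1, if_pos h2, if_pos h]
            · rcases h with ⟨hc, hl⟩
              simp only [solInner, if_neg h1, if_pos h2]
              rw [if_neg, if_pos ⟨hc, hl⟩]
              rintro ⟨hc', -⟩; subst hc; exact absurd hc' (by decide)
            · rcases h with ⟨hc, hl⟩
              simp only [solInner, if_neg h1, if_pos h2]
              rw [if_neg, if_neg, if_pos ⟨hc, hl⟩]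
              · rintro ⟨hc', -⟩; subst hc; exact absurd hc' (by decide)
              · rintro ⟨hc', -⟩; subst hc; exact absurd hc' (by decide)
          rw [this, List.foldl_cons, hstep]
          exact ih stack.dropLast ans
        · have hstep : pvStep (some stack) c = none := by
            simp only [pvStep, if_neg h1, if_pos h2, if_neg h3]
          have h3' : ¬(c = ']' ∧ PySem.List.pyGet? stack (-1) = some '[') ∧
              ¬(c = '}' ∧ PySem.List.pyGet? stack (-1) = some '{') ∧
              ¬(c = ')' ∧ PySem.List.pyGet? stack (-1) = some '(') := by tauto
          simp only [solInner, if_neg h1, if_pos h2, if_neg h3'.1, if_neg h3'.2.1,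
            if_neg h3'.2.2, List.foldl_cons, hstep, foldl_pvStep_none]
      · have hstep : pvStep (some stack) c = none := by
          simp only [pvStep, if_neg h1, if_neg h2]
        simp only [solInner, if_neg h1, if_neg h2, List.foldl_cons, hstep, foldl_pvStep_none]

def rot1 (l : List Char) : List Char := l.tail ++ l.take 1

theorem solIter_eq (ans : Int) (dq : List Char) :
    solIter (ans, dq) = (ans + (if pvScan (rot1 dq) = some [] then 1 else 0), rot1 dq) := by
  simp only [solIter, rot1]
  rw [solInner_eq]
  rcases h : (dq.tail ++ dq.take 1).foldl pvStep (some []) with _ | st'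
  · simp [pvScan, h]
  · rcases st' with _ | ⟨x, xs⟩ <;> simp [pvScan, h]

theorem foldl_ignore {β : Type} (g : Int × List Char → Int × List Char) :
    ∀ (l : List β) (z : Int × List Char), l.foldl (fun st _ => g st) z = g^[l.length] z := by
  intro l
  induction l with
  | nil => intro z; rfl
  | cons x t ih =>
    intro z
    simp only [List.foldl_cons, ih, List.length_cons, Function.iterate_succ_apply]

theorem iter_solIter (m : Nat) (dq : List Char) (ans : Int) :
    solIter^[m] (ans, dq) =
      (ans + ((List.range m).map (fun k => if pvScan (rot1^[k + 1] dq) = some [] then (1 : Int) else 0)).sum,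
        rot1^[m] dq) := by
  induction m with
  | zero => simp
  | succ m ih =>
    rw [Function.iterate_succ_apply', ih, solIter_eq, List.range_succ]
    simp [Function.iterate_succ_apply']
    ring

theorem rot1_iterate (l : List Char) : ∀ (k : Nat), k ≤ l.length →
    rot1^[k] l = l.drop k ++ l.take k := by
  intro k
  induction k with
  | zero => simp
  | succ k ih =>
    intro hk
    have hk' : k < l.length := by omega
    rw [Function.iterate_succ_apply', ih (by omega)]
    unfold rot1
    have hd : l.drop k = l[k] :: l.drop (k + 1) := List.drop_eq_getElem_cons hk'
    rw [hd]
    simp only [List.tail_cons, List.cons_append, List.take_add_one]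
    rw [List.getElem?_eq_getElem hk']
    simp [List.append_assoc]

-- ── pair collapsing: PySem.Chars.replace with an empty replacement is rep2 ──
def rep2 (a b : Char) : List Char → List Char
  | [] => []
  | [c] => [c]
  | c :: d :: t => if c = a ∧ d = b then rep2 a b t else c :: rep2 a b (d :: t)

theorem replGo_eq_rep2 (a b : Char) : ∀ (fuel : Nat) (l acc : List Char), l.length ≤ fuel →
    PySem.Chars.replace.go [a, b] [] fuel l acc = acc.reverse ++ rep2 a b l := by
  intro fuel
  induction fuel with
  | zero =>
    intro l acc hl
    have : l = [] := by cases l <;> simp_all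
    subst this
    simp [PySem.Chars.replace.go, rep2]
  | succ fuel ih =>
    intro l acc hl
    match l with
    | [] => simp [PySem.Chars.replace.go, rep2]
    | c :: t =>
      simp only [PySem.Chars.replace.go]
      split
      · rename_i hpre
        match t, hpre with
        | d :: t', hpre =>
          have hcd : c = a ∧ d = b := by
            simp [List.isPrefixOf] at hpre
            tauto
          have hdrop : List.drop [a, b].length (c :: d :: t') = t' := rfl
          simp only [List.reverse_nil, List.nil_append]
          rw [hdrop, ih t' acc (by simp at hl; omega)]
          rw [rep2, if_pos hcd]
        | [], hpre => simp [List.isPrefixOf] at hpre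
      · rename_i hpre
        rw [ih t (c :: acc) (by simp at hl; omega)]
        match t with
        | [] => simp [rep2]
        | d :: t' =>
          have hcd : ¬(c = a ∧ d = b) := by
            intro ⟨h1, h2⟩; subst h1; subst h2
            simp [List.isPrefixOf] at hpre
          rw [rep2, if_neg hcd]
          simp

theorem repl_eq_rep2 (a b : Char) (l : List Char) :
    PySem.Chars.replace l [a, b] [] = rep2 a b l := by
  have := replGo_eq_rep2 a b l.length l [] le_rfl
  simpa [PySem.Chars.replace] using this

theorem rep2_len_le (a b : Char) : ∀ (l : List Char), (rep2 a b l).length ≤ l.length := by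
  intro l
  induction l using rep2.induct a b with
  | case1 => simp [rep2]
  | case2 c => simp [rep2]
  | case3 c d t h ih => rw [rep2, if_pos h]; simp; omega
  | case4 c d t h ih => rw [rep2, if_neg h]; simpa using ih

theorem rep2_fix_no_infix (a b : Char) : ∀ (l : List Char), rep2 a b l = l → ¬ [a, b] <:+: l := by
  intro l
  induction l using rep2.induct a b with
  | case1 => intro _ h; have := h.length_le; simp at this
  | case2 c => intro _ h; have := h.length_le; simp at this
  | case3 c d t h ih =>
    intro hfix
    exfalso
    have := rep2_len_le a b t
    rw [rep2, if_pos h] at hfix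
    have := congrArg List.length hfix
    simp at this
    omega
  | case4 c d t h ih =>
    intro hfix hin
    rw [rep2, if_neg h] at hfix
    have htail : rep2 a b (d :: t) = d :: t := (List.cons.inj hfix).2
    rcases List.infix_cons_iff.mp hin with hpre | hin'
    · rcases List.cons_prefix_cons.mp hpre with ⟨h1, hpre'⟩
      rcases List.cons_prefix_cons.mp hpre' with ⟨h2, -⟩
      exact h ⟨h1.symm, h2.symm⟩
    · exact ih htail hin'

theorem rep2_eq_or_lt (a b : Char) : ∀ (l : List Char),
    rep2 a b l = l ∨ (rep2 a b l).length < l.length := by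
  intro l
  induction l using rep2.induct a b with
  | case1 => left; rfl
  | case2 c => left; rfl
  | case3 c d t h ih =>
    right
    rw [rep2, if_pos h]
    have := rep2_len_le a b t
    simp; omega
  | case4 c d t h ih =>
    rw [rep2, if_neg h]
    rcases ih with h' | h'
    · left; rw [h']
    · right; simpa using h'

-- ── scan invariance under pair deletion ──
theorem pvStep_cancel (o c : Char)
    (h : (o = '(' ∧ c = ')') ∨ (o = '[' ∧ c = ']') ∨ (o = '{' ∧ c = '}')) :
    ∀ (st : Option (List Char)), pvStep (pvStep st o) c = st := by
  intro st
  rcases st with _ | stack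
  · rfl
  · rcases h with ⟨h1, h2⟩ | ⟨h1, h2⟩ | ⟨h1, h2⟩ <;> subst h1 <;> subst h2 <;>
      simp [pvStep, PySem.List.pyGet?_neg_one]

theorem rep2_scan (a b : Char)
    (hpair : (a = '(' ∧ b = ')') ∨ (a = '[' ∧ b = ']') ∨ (a = '{' ∧ b = '}')) :
    ∀ (l : List Char) (st : Option (List Char)),
      (rep2 a b l).foldl pvStep st = l.foldl pvStep st := by
  intro l
  induction l using rep2.induct a b with
  | case1 => intro st; rfl
  | case2 c => intro st; rfl
  | case3 c d t h ih =>
    intro st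
    rcases h with ⟨h1, h2⟩
    subst h1; subst h2
    rw [rep2, if_pos ⟨rfl, rfl⟩, ih st, List.foldl_cons, List.foldl_cons,
      pvStep_cancel _ _ hpair st]
  | case4 c d t h ih =>
    intro st
    rw [rep2, if_neg h, List.foldl_cons, List.foldl_cons, ih]

-- ── a nonempty string with no adjacent matched pair never scans to the empty stack ──
def pvOpener (c : Char) : Bool := c ∈ (['[', '{', '('] : List Char)

theorem scan_all_openers : ∀ (l st : List Char), (∀ c ∈ l, pvOpener c) →
    l.foldl pvStep (some st) = some (st ++ l) := by
  intro l
  induction l with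
  | nil => intro st _; simp
  | cons c t ih =>
    intro st h
    have hc : c ∈ (['[', '{', '('] : List Char) := by
      have := h c (by simp)
      simpa [pvOpener] using this
    rw [List.foldl_cons]
    have : pvStep (some st) c = some (st ++ [c]) := by simp [pvStep, hc]
    rw [this, ih (st ++ [c]) (fun d hd => h d (by simp [hd]))]
    simp

theorem no_pair_scan (l : List Char) (hne : l ≠ [])
    (h1 : ¬ ['(', ')'] <:+: l) (h2 : ¬ ['[', ']'] <:+: l) (h3 : ¬ ['{', '}'] <:+: l) :
    pvScan l ≠ some [] := by
  by_cases hall : ∀ c ∈ l, pvOpener c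
  · rw [pvScan, scan_all_openers l [] hall]
    simpa using hne
  · -- split at the first non-opener
    have hsplit : l = l.takeWhile pvOpener ++ l.dropWhile pvOpener :=
      (List.takeWhile_append_dropWhile).symm
    set u := l.takeWhile pvOpener with hu
    set r := l.dropWhile pvOpener with hr
    have hrne : r ≠ [] := by
      intro hcon
      apply hall
      intro c hc
      have : c ∈ u := by rw [hsplit] at hc; simp [hcon] at hc; exact hc
      exact List.mem_takeWhile_imp this
    rcases r with _ | ⟨c, v⟩
    · exact absurd rfl hrne
    have hcnot : ¬ pvOpener c := by
      have := List.head_dropWhile_not pvOpener (l := l) (by rw [← hr]; simp)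
      simpa [← hr] using this
    have huop : ∀ d ∈ u, pvOpener d := fun d hd => List.mem_takeWhile_imp hd
    rw [pvScan, hsplit, List.foldl_append, scan_all_openers u [] huop, List.nil_append,
      List.foldl_cons]
    have hstep : pvStep (some u) c = none := by
      rcases hue : u with _ | _
      · simp [pvStep, pvOpener] at hcnot ⊢
        tauto
      · rw [← hue]
        have hune : u ≠ [] := by rw [hue]; simp
        have hlast := List.dropLast_append_getLast hune
        set o := u.getLast hune with ho
        have hoop : pvOpener o := huop o (List.getLast_mem hune)
        have hget : PySem.List.pyGet? u (-1) = some o := by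
          rw [PySem.List.pyGet?_neg_one, List.getLast?_eq_getLast_of_ne_nil hune]
        have mk : ∀ x y : Char, o = x → c = y → [x, y] <:+: l := by
          intro x y hx hy
          refine ⟨u.dropLast, v, ?_⟩
          rw [← hx, ← hy]
          conv_rhs => rw [hsplit, ← hlast]
          simp
        have hnom : ¬((c = ']' ∧ PySem.List.pyGet? u (-1) = some '[') ∨
            (c = '}' ∧ PySem.List.pyGet? u (-1) = some '{') ∨
            (c = ')' ∧ PySem.List.pyGet? u (-1) = some '(')) := by
          rintro (⟨hc, hl⟩ | ⟨hc, hl⟩ | ⟨hc, hl⟩)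
          · rw [hget] at hl; injection hl with hl; exact h2 (mk '[' ']' hl hc)
          · rw [hget] at hl; injection hl with hl; exact h3 (mk '{' '}' hl hc)
          · rw [hget] at hl; injection hl with hl; exact h1 (mk '(' ')' hl hc)
        simp only [pvStep]
        rw [if_neg (by simpa [pvOpener] using hcnot), if_pos (by rw [hue]; simp), if_neg hnom]
    rw [hstep, foldl_pvStep_none]
    simp

-- ── collapse: scan-invariant, and empty iff the scan accepts ──
theorem collapseStep_scan (t : List Char) (st : Option (List Char)) :
    (collapseStep t).foldl pvStep st = t.foldl pvStep st := by
  unfold collapseStep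
  rw [repl_eq_rep2, repl_eq_rep2, repl_eq_rep2,
    rep2_scan '{' '}' (by tauto), rep2_scan '[' ']' (by tauto), rep2_scan '(' ')' (by tauto)]

theorem collapse_scan (t : List Char) : pvScan (collapse t) = pvScan t := by
  rw [collapse]
  split
  · rfl
  · rw [collapse_scan (collapseStep t), pvScan, pvScan, collapseStep_scan]
termination_by t.length
decreasing_by exact collapseStep_lt t (by assumption)

theorem collapse_fixed (t : List Char) : collapseStep (collapse t) = collapse t := by
  rw [collapse]
  split
  · assumption
  · exact collapse_fixed (collapseStep t)
termination_by t.length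
decreasing_by exact collapseStep_lt t (by assumption)

theorem fixed_components (r : List Char) (h : collapseStep r = r) :
    rep2 '(' ')' r = r ∧ rep2 '[' ']' r = r ∧ rep2 '{' '}' r = r := by
  unfold collapseStep at h
  rw [repl_eq_rep2, repl_eq_rep2, repl_eq_rep2] at h
  have l1 := rep2_len_le '(' ')' r
  have l2 := rep2_len_le '[' ']' (rep2 '(' ')' r)
  have l3 := rep2_len_le '{' '}' (rep2 '[' ']' (rep2 '(' ')' r))
  have hlen : (rep2 '{' '}' (rep2 '[' ']' (rep2 '(' ')' r))).length = r.length := by rw [h]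
  have e1 : rep2 '(' ')' r = r := by
    rcases rep2_eq_or_lt '(' ')' r with h' | h'
    · exact h'
    · omega
  rw [e1] at h l2 l3 hlen
  have e2 : rep2 '[' ']' r = r := by
    rcases rep2_eq_or_lt '[' ']' r with h' | h'
    · exact h'
    · omega
  rw [e2] at h
  exact ⟨e1, e2, h⟩

theorem collapse_nil_iff (t : List Char) : collapse t = [] ↔ pvScan t = some [] := by
  constructor
  · intro h
    rw [← collapse_scan t, h]
    rfl
  · intro h
    by_contra hne
    obtain ⟨f1, f2, f3⟩ := fixed_components (collapse t) (collapse_fixed t)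
    exact no_pair_scan (collapse t) hne
      (rep2_fix_no_infix '(' ')' _ f1) (rep2_fix_no_infix '[' ']' _ f2)
      (rep2_fix_no_infix '{' '}' _ f3)
      (by rw [collapse_scan t]; exact h)

-- ── counting: both programs count the rotations accepted by the scan ──
theorem solution_eq_count (s : String) :
    solution s = ((List.range s.toList.length).map
      (fun k => if pvScan (rot1^[k + 1] s.toList) = some [] then (1 : Int) else 0)).sum := by
  unfold solution
  rw [PySem.List.len_eq, PySem.List.pyRange_zero_natCast, foldl_ignore]
  rw [List.length_map, List.length_range, iter_solIter]
  simp

theorem solution_alt_eq_count (s : String) :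
    solution_alt s = ((List.range s.toList.length).map
      (fun k => if pvScan (s.toList.drop k ++ s.toList.take k) = some [] then (1 : Int) else 0)).sum := by
  simp only [solution_alt]
  rw [PySem.List.len_eq, PySem.List.pyRange_zero_natCast, List.foldl_map]
  have key : ∀ (k : Nat) (acc : Int),
      (if collapse (PySem.List.slice s.toList (some ((k : Nat) : Int)) none ++
          PySem.List.slice s.toList none (some ((k : Nat) : Int))) = [] then acc + 1 else acc)
      = acc + (if pvScan (s.toList.drop k ++ s.toList.take k) = some [] then (1 : Int) else 0) := by
    intro k acc
    rw [PySem.List.slice_from_natCast, PySem.List.slice_to_natCast]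
    by_cases hc : collapse (s.toList.drop k ++ s.toList.take k) = []
    · rw [if_pos hc, if_pos ((collapse_nil_iff _).mp hc)]
    · rw [if_neg hc, if_neg (fun hs => hc ((collapse_nil_iff _).mpr hs))]
      simp
  induction (List.range s.toList.length) using List.reverseRecOn with
  | nil => rfl
  | append_singleton l k ih =>
    simp only [List.foldl_append, List.foldl_cons, List.foldl_nil, List.map_append,
      List.sum_append, ih]
    rw [key]
    simp

theorem rotation_count_shift (l : List Char) :
    ((List.range l.length).map
      (fun k => if pvScan (rot1^[k + 1] l) = some [] then (1 : Int) else 0)).sum =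
    ((List.range l.length).map
      (fun k => if pvScan (l.drop k ++ l.take k) = some [] then (1 : Int) else 0)).sum := by
  set f : Nat → Int := fun k => if pvScan (l.drop (k % l.length) ++ l.take (k % l.length)) = some [] then 1 else 0 with hf
  have hrot : ∀ k, k ≤ l.length → (if pvScan (rot1^[k] l) = some [] then (1 : Int) else 0) =
      f k := by
    intro k hk
    rw [rot1_iterate l k hk]
    simp only [hf]
    rcases Nat.lt_or_ge k l.length with h | h
    · rw [Nat.mod_eq_of_lt h]
    · have : k = l.length := by omega
      subst this
      simp
  calc ((List.range l.length).map (fun k => if pvScan (rot1^[k + 1] l) = some [] then (1 : Int) else 0)).sum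
      = ((List.range l.length).map (fun k => f (k + 1))).sum := by
        apply congrArg
        apply List.map_congr_left
        intro k hk
        exact hrot (k + 1) (by simp at hk; omega)
    _ = ((List.range l.length).map f).sum := by
        rcases Nat.eq_zero_or_pos l.length with h0 | h0
        · simp [h0]
        · have hper : ∀ k, f (k + l.length) = f k := by
            intro k
            simp [hf, Nat.add_mod_right]
          -- range (n) shifted by one: sum f(k+1) over range n = sum f over range n since f n = f 0
          have hfn : f l.length = f 0 := by
            have := hper 0
            simpa using this
          have h1 : ((List.range (l.length + 1)).map f).sum =
              f 0 + ((List.range l.length).map (fun k => f (k + 1))).sum := by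
            rw [List.range_succ_eq_map]
            simp [List.map_map, Function.comp_def, Nat.succ_eq_add_one]
          have h2 : ((List.range (l.length + 1)).map f).sum =
              ((List.range l.length).map f).sum + f l.length := by
            rw [List.range_succ]
            simp
          omega
    _ = ((List.range l.length).map (fun k => if pvScan (l.drop k ++ l.take k) = some [] then (1 : Int) else 0)).sum := by
        apply congrArg
        apply List.map_congr_left
        intro k hk
        simp at hk
        simp only [hf]
        rw [Nat.mod_eq_of_lt hk]

-- ===== VERDICT (by name: the statement is the Claim_ definition above) =====
theorem solution_spec : Claim_equal_solution := by
  intro s _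
  unfold Spec_solution
  rw [solution_eq_count, solution_alt_eq_count, rotation_count_shift]
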